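-- pv_equiv track=rewrite | github.com/Lord-0F-War/Boogaloo-A-House-Divided | Utility.py | generate_fading_colors
-- ===== SOURCE A (Python) =====
-- def generate_fading_colors(num_values, base_color):
-- 	colors = []
-- 	r, g, b = base_color
-- 	step = 160 // num_values
--
-- 	for i in range(num_values):
-- 		colors.append((r, g, b))
-- 		r = max(r - step, 0)
-- 		g = max(g - step, 0)
-- 		b = max(b - step, 0)
--
-- 	return colors
-- ===== SOURCE B (Python) =====
-- def generate_fading_colors(num_values, base_color):
-- 	step = 160 // num_values
--
-- 	def fade(color, k):
-- 		# k colors, starting at color, each subsequent one faded one step toward 0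
-- 		if k <= 0:
-- 			return []
-- 		if k == 1:
-- 			return [color]
-- 		h = k // 2
-- 		r, g, b = color
-- 		mid = (max(r - h * step, 0), max(g - h * step, 0), max(b - h * step, 0))
-- 		return fade(color, h) + fade(mid, k - h)
--
-- 	return fade(base_color, num_values)
-- ===== Notes on version B (the rewrite author's own statement) =====
-- stated objective: alternative
-- what changed: Replaces the sequential loop carrying a mutated list and three clamped channel accumulators by a balanced divide-and-conquer: the midpoint color is computed directly by the clamped closed form max(channel - h*step, 0) and the two halves are generated recursively, so no per-iteration accumulator state is carried.
import Mathlib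
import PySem

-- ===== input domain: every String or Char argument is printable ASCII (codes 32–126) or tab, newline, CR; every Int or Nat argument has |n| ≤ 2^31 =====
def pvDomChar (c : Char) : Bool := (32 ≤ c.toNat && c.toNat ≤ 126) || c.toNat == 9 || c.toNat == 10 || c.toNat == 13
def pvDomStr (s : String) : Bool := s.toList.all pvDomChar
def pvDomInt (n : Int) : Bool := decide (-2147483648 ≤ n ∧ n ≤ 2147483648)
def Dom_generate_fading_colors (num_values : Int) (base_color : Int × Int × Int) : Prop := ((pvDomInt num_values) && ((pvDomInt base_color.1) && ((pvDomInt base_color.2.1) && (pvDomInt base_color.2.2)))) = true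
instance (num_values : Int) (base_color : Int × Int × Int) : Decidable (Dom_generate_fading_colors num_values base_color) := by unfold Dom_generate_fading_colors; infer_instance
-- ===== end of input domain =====

-- B replaces A's loop carrying mutable list/channel state by a balanced divide-and-conquer that jumps
-- ahead h steps via the clamped closed form max(channel - h*step, 0); objective: alternative algorithm.


-- ===== PORT A =====
-- loop state: (colors, r, g, b); each iteration appends the current color, then clamps after subtracting step
def generate_fading_colors (num_values : Int) (base_color : Int × Int × Int) : List (Int × Int × Int) :=
  let step := PySem.Int.floordiv 160 num_values
  ((PySem.List.pyRange 0 num_values 1).foldl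
    (fun (st : List (Int × Int × Int) × Int × Int × Int) _ =>
      (st.1 ++ [(st.2.1, st.2.2.1, st.2.2.2)],
       max (st.2.1 - step) 0, max (st.2.2.1 - step) 0, max (st.2.2.2 - step) 0))
    ([], base_color.1, base_color.2.1, base_color.2.2)).1

-- ===== PORT B =====
-- B's recursive helper 'fade': the Python counter k (an int, base case k <= 0) is represented by the
-- Nat 'num_values.toNat', which is exact: toNat sends every k <= 0 to 0, and 'k // 2' and 'k - h' on
-- positive Python ints coincide with Nat division and subtraction.
def pvFadeDC (s : Int) (c : Int × Int × Int) (k : Nat) : List (Int × Int × Int) :=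
  if k = 0 then []
  else if k = 1 then [c]
  else
    let h := k / 2
    pvFadeDC s c h ++
      pvFadeDC s (max (c.1 - (h : Int) * s) 0, max (c.2.1 - (h : Int) * s) 0, max (c.2.2 - (h : Int) * s) 0) (k - h)
termination_by k
decreasing_by all_goals omega

def generate_fading_colors_alt (num_values : Int) (base_color : Int × Int × Int) : List (Int × Int × Int) :=
  let step := PySem.Int.floordiv 160 num_values
  pvFadeDC step base_color num_values.toNat

-- ===== PRECONDITION & SPEC =====
-- Pre_ excludes only num_values = 0, where both A and B raise ZeroDivisionError on '160 // num_values'.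
def Pre_generate_fading_colors (num_values : Int) (base_color : Int × Int × Int) : Prop := num_values ≠ 0
instance (num_values : Int) (base_color : Int × Int × Int) : Decidable (Pre_generate_fading_colors num_values base_color) := by unfold Pre_generate_fading_colors; infer_instance
def pvWitness_generate_fading_colors : Int × (Int × Int × Int) := (5, (200, 160, 120))

def Spec_generate_fading_colors (num_values : Int) (base_color : Int × Int × Int) (out : List (Int × Int × Int)) : Prop := out = generate_fading_colors_alt num_values base_color
instance (num_values : Int) (base_color : Int × Int × Int) (out : List (Int × Int × Int)) : Decidable (Spec_generate_fading_colors num_values base_color out) := by unfold Spec_generate_fading_colors; infer_instance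

-- ===== CLAIM (what is proved, stated in full; the proofs are below) =====
def Claim_equal_generate_fading_colors : Prop := ∀ (num_values : Int) (base_color : Int × Int × Int), Dom_generate_fading_colors num_values base_color → Pre_generate_fading_colors num_values base_color → Spec_generate_fading_colors num_values base_color (generate_fading_colors num_values base_color)

-- ===== LEMMAS AND PROOFS =====

-- ghost spec: the straightforward one-step-at-a-time recursion; both ports are proved equal to it
def pvFade (step : Int) : (Int × Int × Int) → Nat → List (Int × Int × Int)
  | _, 0 => []
  | c, Nat.succ k =>
      c :: pvFade step (max (c.1 - step) 0, max (c.2.1 - step) 0, max (c.2.2 - step) 0) k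

-- loop invariant for A: folding the body over k = b - a remaining indices, from any accumulator and
-- current channels r g b', appends exactly pvFade s (r, g, b') k
theorem pv_loop (s : Int) :
    ∀ (k : Nat) (a b : Int), b - a = (k : Int) →
    ∀ (acc : List (Int × Int × Int)) (r g b' : Int),
    ((PySem.List.pyRange a b 1).foldl
      (fun (st : List (Int × Int × Int) × Int × Int × Int) _ =>
        (st.1 ++ [(st.2.1, st.2.2.1, st.2.2.2)],
         max (st.2.1 - s) 0, max (st.2.2.1 - s) 0, max (st.2.2.2 - s) 0))
      (acc, r, g, b')).1
    = acc ++ pvFade s (r, g, b') k := by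
  intro k
  induction k with
  | zero =>
    intro a b hba acc r g b'
    rw [PySem.List.pyRange_one_eq_nil (by omega)]
    simp [pvFade]
  | succ k ih =>
    intro a b hba acc r g b'
    rw [PySem.List.pyRange_one_cons (by omega : a < b)]
    simp only [List.foldl_cons]
    rw [ih (a + 1) b (by omega) (acc ++ [(r, g, b')]) (max (r - s) 0) (max (g - s) 0) (max (b' - s) 0)]
    simp [pvFade]

-- clamped subtraction composes: a further clamped subtraction of s advances the clamped total
theorem pv_clamp (x t s : Int) (hs : 0 ≤ s) :
    max (max (x - t) 0 - s) 0 = max (x - (t + s)) 0 := by omega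

-- splitting pvFade at h ≥ 1: the tail restarts from the clamped closed form after h steps
theorem pvFade_split (s : Int) (hs : 0 ≤ s) :
    ∀ (h : Nat), 1 ≤ h → ∀ (m : Nat) (c : Int × Int × Int),
    pvFade s c (h + m)
      = pvFade s c h ++
        pvFade s (max (c.1 - (h : Int) * s) 0, max (c.2.1 - (h : Int) * s) 0, max (c.2.2 - (h : Int) * s) 0) m := by
  intro h
  induction h with
  | zero => intro hh; omega
  | succ h ih =>
    intro _ m c
    by_cases h0 : h = 0
    · subst h0
      have h1m : 1 + m = Nat.succ m := by omega
      rw [h1m]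
      simp [pvFade]
    · have hstep : ∀ x : Int, max (max (x - s) 0 - (h : Int) * s) 0 = max (x - ((h : Nat).succ : Int) * s) 0 := by
        intro x
        rw [pv_clamp _ _ _ (by positivity : (0:Int) ≤ (h : Int) * s)]
        push_cast
        ring_nf
      have hsm : h.succ + m = Nat.succ (h + m) := by omega
      rw [hsm]
      simp only [pvFade]
      rw [ih (by omega) m (max (c.1 - s) 0, max (c.2.1 - s) 0, max (c.2.2 - s) 0)]
      simp only [hstep]
      rfl

-- the divide-and-conquer port computes the ghost spec
theorem pvFadeDC_eq (s : Int) (hs : 0 ≤ s) :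
    ∀ (k : Nat) (c : Int × Int × Int), pvFadeDC s c k = pvFade s c k := by
  intro k
  induction k using Nat.strong_induction_on with
  | _ k ih =>
    intro c
    match k, ih with
    | 0, _ => simp [pvFadeDC, pvFade]
    | 1, _ => simp [pvFadeDC, pvFade]
    | (n+2), ih =>
      rw [pvFadeDC]
      simp only [show ¬(n + 2 = 0) by omega, show ¬(n + 2 = 1) by omega, if_false]
      rw [ih ((n+2)/2) (by omega), ih ((n+2) - (n+2)/2) (by omega)]
      rw [← pvFade_split s hs ((n+2)/2) (by omega) ((n+2) - (n+2)/2) c]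
      congr 1
      omega

-- ===== VERDICT (by name: the statement is the Claim_ definition above) =====
theorem generate_fading_colors_spec : Claim_equal_generate_fading_colors := by
  intro n c _ _
  unfold Spec_generate_fading_colors generate_fading_colors generate_fading_colors_alt
  by_cases hn : n ≤ 0
  · rw [PySem.List.pyRange_one_eq_nil hn]
    have : n.toNat = 0 := by omega
    simp [this, pvFadeDC]
  · rw [pv_loop _ n.toNat 0 n (by omega) [] c.1 c.2.1 c.2.2]
    have hs : 0 ≤ PySem.Int.floordiv 160 n := by
      rw [PySem.Int.floordiv_eq_ediv_of_pos (by omega)]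
      exact Int.ediv_nonneg (by norm_num) (by omega)
    rw [pvFadeDC_eq _ hs]
    simp
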